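-- pv_equiv track=rewrite | github.com/AJPardhiv/Aspect-Level-Sentiment-Analysis-of-Product-Reviews | absa_feature_engineering.py | _find_span_tokens
-- ===== SOURCE A (Python) =====
-- from typing import Dict, Iterable, List, Sequence, Tuple
--
-- def _find_span_tokens(tokens: Sequence[str], aspect_tokens: Sequence[str]) -> List[int]:
--     if not tokens or not aspect_tokens:
--         return []
--
--     lower_tokens = [token.lower() for token in tokens]
--     lower_aspect = [token.lower() for token in aspect_tokens]
--     span_length = len(lower_aspect)
--     matches: List[int] = []
--
--     for index in range(0, len(lower_tokens) - span_length + 1):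
--         if lower_tokens[index:index + span_length] == lower_aspect:
--             matches.append(index)
--     return matches
-- ===== SOURCE B (Python) =====
-- def _find_span_tokens(tokens, aspect_tokens):
--     if not tokens or not aspect_tokens:
--         return []
--
--     low = [t.lower() for t in tokens]
--     pat = [t.lower() for t in aspect_tokens]
--     m = len(pat)
--
--     # Walk start positions backwards with an explicit token-by-token inner
--     # comparison that exits early on the first mismatch; no slices are built.
--     out = []
--     i = len(low) - m
--     while i >= 0:
--         j = 0
--         while j < m and low[i + j] == pat[j]:
--             j += 1
--         if j == m:
--             out.append(i)
--         i -= 1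
--     out.reverse()
--     return out
-- ===== Notes on version B (the rewrite author's own statement) =====
-- stated objective: alternative
-- what changed: A scans window starts forward and materialises a fresh list slice per position to compare wholesale; B walks start positions backwards with an explicit token-by-token inner loop that exits early at the first mismatch (no slices, no range object), collecting matches in descending order and reversing once at the end.
import Mathlib
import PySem

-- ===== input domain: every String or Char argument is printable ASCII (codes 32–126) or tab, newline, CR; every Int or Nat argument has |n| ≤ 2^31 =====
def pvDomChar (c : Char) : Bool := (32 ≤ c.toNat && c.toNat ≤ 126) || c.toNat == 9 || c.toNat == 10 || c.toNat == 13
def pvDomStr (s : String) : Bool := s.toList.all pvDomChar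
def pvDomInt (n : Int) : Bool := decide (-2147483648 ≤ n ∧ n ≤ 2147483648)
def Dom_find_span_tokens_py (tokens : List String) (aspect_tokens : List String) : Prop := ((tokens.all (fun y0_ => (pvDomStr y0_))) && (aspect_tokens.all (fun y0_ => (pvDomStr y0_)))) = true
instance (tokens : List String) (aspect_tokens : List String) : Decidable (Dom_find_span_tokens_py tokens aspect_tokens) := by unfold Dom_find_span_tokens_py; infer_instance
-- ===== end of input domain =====

-- B replaces A's forward scan with per-position slice comparison by a backwards index walk with an early-exit token-by-token inner loop and a final reverse; same result, alternative structure, no speed claim.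

-- ===== PORT A =====
def find_span_tokens_py (tokens : List String) (aspect_tokens : List String) : List Int :=
  if tokens = [] ∨ aspect_tokens = [] then []
  else
    let lower_tokens := tokens.map PySem.Str.lower
    let lower_aspect := aspect_tokens.map PySem.Str.lower
    let span_length : Int := lower_aspect.length
    (PySem.List.pyRange 0 ((lower_tokens.length : Int) - span_length + 1) 1).foldl
      (fun acc index =>
        if PySem.List.slice lower_tokens (some index) (some (index + span_length)) = lower_aspect
        then acc ++ [index] else acc) []

-- ===== PORT B =====
-- inner 'while j < m and low[i+j] == pat[j]' loop: recursion over the pattern at offset j, early exit on mismatch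
def pvMatchAt (low : List String) (i : Nat) : Nat → List String → Bool
  | _, [] => true
  | j, p :: ps => low.getD (i + j) "" == p && pvMatchAt low i (j + 1) ps

-- outer 'while i >= 0: … i -= 1' loop: counts the start position down to 0, appending hits in descending order
def pvScanDown (low pat : List String) : Nat → List Int
  | 0 => if pvMatchAt low 0 0 pat then [(0 : Int)] else []
  | i + 1 => (if pvMatchAt low (i + 1) 0 pat then [((i + 1 : Nat) : Int)] else []) ++ pvScanDown low pat i

def find_span_tokens_py_alt (tokens : List String) (aspect_tokens : List String) : List Int :=
  if tokens = [] ∨ aspect_tokens = [] then []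
  else
    let low := tokens.map PySem.Str.lower
    let pat := aspect_tokens.map PySem.Str.lower
    if low.length < pat.length then []   -- i = len(low) - m starts negative: the while loop never runs
    else (pvScanDown low pat (low.length - pat.length)).reverse

-- ===== PRECONDITION & SPEC =====
def Spec_find_span_tokens_py (tokens : List String) (aspect_tokens : List String) (out : List Int) : Prop := out = find_span_tokens_py_alt tokens aspect_tokens
instance (tokens : List String) (aspect_tokens : List String) (out : List Int) : Decidable (Spec_find_span_tokens_py tokens aspect_tokens out) := by unfold Spec_find_span_tokens_py; infer_instance

-- ===== CLAIM (what is proved, stated in full; the proofs are below) =====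
def Claim_equal_find_span_tokens_py : Prop := ∀ (tokens : List String) (aspect_tokens : List String), Dom_find_span_tokens_py tokens aspect_tokens → Spec_find_span_tokens_py tokens aspect_tokens (find_span_tokens_py tokens aspect_tokens)

-- ===== LEMMAS AND PROOFS =====

-- A window equality (drop/take) is the same as pointwise getD checks.
theorem window_eq_iff (lt la : List String) (k : Nat) (hk : k + la.length ≤ lt.length) :
    ((lt.drop k).take la.length = la)
      ↔ ∀ j : Nat, j < la.length → lt.getD (k + j) "" = la.getD j "" := by
  constructor
  · intro h j hj
    have h1 : ((lt.drop k).take la.length)[j]? = la[j]? := by rw [h]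
    rw [List.getElem?_take, List.getElem?_drop] at h1
    simp only [hj, if_pos] at h1
    have hlt : k + j < lt.length := by omega
    rw [List.getElem?_eq_getElem hlt, List.getElem?_eq_getElem hj] at h1
    simp only [List.getD_eq_getElem?_getD, List.getElem?_eq_getElem hlt,
      List.getElem?_eq_getElem hj, Option.getD_some]
    exact Option.some.inj h1
  · intro h
    apply List.ext_getElem?
    intro j
    rw [List.getElem?_take, List.getElem?_drop]
    by_cases hj : j < la.length
    · simp only [hj, if_pos]
      have hlt : k + j < lt.length := by omega
      have := h j hj
      simp only [List.getD_eq_getElem?_getD, List.getElem?_eq_getElem hlt,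
        List.getElem?_eq_getElem hj, Option.getD_some] at this
      rw [List.getElem?_eq_getElem hlt, List.getElem?_eq_getElem hj, this]
    · simp only [hj, if_false]
      rw [eq_comm, List.getElem?_eq_none_iff]
      omega

-- The early-exit inner loop is the pointwise window check at offset j.
theorem pvMatchAt_iff (low : List String) (i : Nat) (ps : List String) (j : Nat) :
    pvMatchAt low i j ps = true
      ↔ ∀ t : Nat, t < ps.length → low.getD (i + j + t) "" = ps.getD t "" := by
  induction ps generalizing j with
  | nil => simp [pvMatchAt]
  | cons p ps ih =>
      simp only [pvMatchAt, Bool.and_eq_true, beq_iff_eq, ih (j + 1)]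
      constructor
      · rintro ⟨h0, h1⟩ t ht
        cases t with
        | zero => simpa using h0
        | succ t =>
            have := h1 t (by simpa using Nat.lt_of_succ_lt_succ ht)
            have harith : i + (j + 1) + t = i + j + (t + 1) := by omega
            rw [harith] at this
            simpa using this
      · intro h
        refine ⟨by simpa using h 0 (by simp), ?_⟩
        intro t ht
        have := h (t + 1) (by simpa using Nat.succ_lt_succ ht)
        have harith : i + (j + 1) + t = i + j + (t + 1) := by omega
        rw [harith]
        simpa using this

-- Descending scan reversed = ascending filter over the start range.
theorem pvScanDown_reverse (low pat : List String) (i : Nat) :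
    (pvScanDown low pat i).reverse
      = ((List.range (i + 1)).filter (fun k => pvMatchAt low k 0 pat)).map (fun k => (k : Int)) := by
  induction i with
  | zero =>
      by_cases h : pvMatchAt low 0 0 pat = true <;>
        simp [pvScanDown, List.range_succ, h]
  | succ i ih =>
      rw [List.range_succ]
      by_cases h : pvMatchAt low (i + 1) 0 pat = true <;>
        simp [pvScanDown, h, ih]

theorem find_span_tokens_py_spec' (tokens aspect_tokens : List String) :
    find_span_tokens_py tokens aspect_tokens = find_span_tokens_py_alt tokens aspect_tokens := by
  unfold find_span_tokens_py find_span_tokens_py_alt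
  by_cases hguard : tokens = [] ∨ aspect_tokens = []
  · simp [hguard]
  · simp only [hguard, if_false]
    set lt := tokens.map PySem.Str.lower with hlt
    set la := aspect_tokens.map PySem.Str.lower with hla
    rw [PySem.List.foldl_append_ite_eq_filter, List.nil_append]
    by_cases hlen : lt.length < la.length
    · rw [if_pos hlen, PySem.List.pyRange_one_eq_nil (by omega), List.filter_nil]
    · rw [if_neg hlen, pvScanDown_reverse]
      have hcast : (lt.length : Int) - (la.length : Int) + 1
          = ((lt.length - la.length + 1 : Nat) : Int) := by omega
      rw [hcast, PySem.List.pyRange_zero_natCast, List.filter_map]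
      have hfil : ∀ k ∈ List.range (lt.length - la.length + 1),
          ((fun x => decide (PySem.List.slice lt (some x) (some (x + (la.length : Int))) = la))
              ∘ fun k : Nat => (k : Int)) k
            = pvMatchAt lt k 0 la := by
        intro k hk
        rw [List.mem_range] at hk
        have hkm : k + la.length ≤ lt.length := by omega
        have hslice : PySem.List.slice lt (some (k : Int)) (some ((k : Int) + (la.length : Int)))
            = (lt.drop k).take la.length := PySem.List.slice_natCast_add lt k la.length
        simp only [Function.comp_apply, hslice]
        rw [Bool.eq_iff_iff]
        simp only [decide_eq_true_eq]
        rw [window_eq_iff lt la k hkm, pvMatchAt_iff lt k la 0]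
        constructor
        · intro h t ht
          have := h t ht
          simpa using this
        · intro h t ht
          have := h t ht
          simpa using this
      rw [List.filter_congr hfil]
      simp only [List.map_id']
      exact List.map_eq_flatMap

-- ===== VERDICT (by name: the statement is the Claim_ definition above) =====
theorem find_span_tokens_py_spec : Claim_equal_find_span_tokens_py := by
  intro tokens aspect_tokens _
  exact find_span_tokens_py_spec' tokens aspect_tokens
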